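-- pv_equiv track=rewrite | github.com/jamesignac/find_potential_genome_dnaa_box | findGenomeDnaABox.py | find_dnaa_boxes
-- ===== SOURCE A (Python) =====
-- def hamming_distance(str1, str2):
--     ham_dist = 0
--     if len(str1) != len(str2):
--         raise ValueError("Strings must be of equal length")
--
--     for i in range(len(str1)):
--          if str1[i] != str2[i]:
--               ham_dist+=1
--          else:
--              ham_dist+=0
--     return ham_dist
--
-- def neighbors(pattern, d):
--     nucleotides = ['A', 'C', 'G', 'T']
--     if d == 0:
--         return {pattern}
--     if len(pattern) == 1:
--         return set(nucleotides)
--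
--     neighborhood = set()
--     suffix_neighbors = neighbors(pattern[1:], d)
--
--     for text in suffix_neighbors:
--         if hamming_distance(pattern[1:], text) < d:
--             for nucleotide in nucleotides:
--                 neighborhood.add(nucleotide + text)
--         else:
--             neighborhood.add(pattern[0] + text)
--
--     return neighborhood
--
-- def find_dnaa_boxes(genome, k=9, d=1):
--     dnaa_boxes = set()
--
--     for i in range(len(genome) - k + 1):
--         pattern = genome[i:i + k]
--         pattern_neighbors = neighbors(pattern, d)  # Use the neighbors function to find potential boxes
--
--         for neighbor in pattern_neighbors:
--             dnaa_boxes.add(neighbor)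
--
--     return dnaa_boxes
-- ===== SOURCE B (Python) =====
-- def find_dnaa_boxes(genome, k=9, d=1):
--     # Iterative right-to-left pass per window: the neighborhood grows one character at a
--     # time while a dict tracks each neighbor's Hamming distance incrementally (no
--     # recursion, no re-scanning hamming_distance per neighbor).
--     boxes = set()
--     for i in range(len(genome) - k + 1):
--         pattern = genome[i:i + k]
--         if d == 0:
--             boxes.add(pattern)
--             continue
--         level = set("ACGT")
--         dist = {n: (0 if n == pattern[-1] else 1) for n in "ACGT"}
--         for c in reversed(pattern[:-1]):
--             new_level = set()
--             new_dist = {}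
--             for t in level:
--                 e = dist[t]
--                 if e < d:
--                     for n in "ACGT":
--                         new_level.add(n + t)
--                         new_dist[n + t] = e + (n != c)
--                 else:
--                     new_level.add(c + t)
--                     new_dist[c + t] = e
--             level, dist = new_level, new_dist
--         for t in level:
--             boxes.add(t)
--     return boxes
-- ===== Notes on version B (the rewrite author's own statement) =====
-- stated objective: alternative
-- what changed: Replaces the recursive set-based neighbors helper (which re-scans a full Hamming-distance comparison for every suffix neighbor at every recursion level) by an iterative right-to-left per-window pass that grows the neighborhood one character at a time while a dict tracks each neighbor's Hamming distance incrementally in O(1).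
import Mathlib
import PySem

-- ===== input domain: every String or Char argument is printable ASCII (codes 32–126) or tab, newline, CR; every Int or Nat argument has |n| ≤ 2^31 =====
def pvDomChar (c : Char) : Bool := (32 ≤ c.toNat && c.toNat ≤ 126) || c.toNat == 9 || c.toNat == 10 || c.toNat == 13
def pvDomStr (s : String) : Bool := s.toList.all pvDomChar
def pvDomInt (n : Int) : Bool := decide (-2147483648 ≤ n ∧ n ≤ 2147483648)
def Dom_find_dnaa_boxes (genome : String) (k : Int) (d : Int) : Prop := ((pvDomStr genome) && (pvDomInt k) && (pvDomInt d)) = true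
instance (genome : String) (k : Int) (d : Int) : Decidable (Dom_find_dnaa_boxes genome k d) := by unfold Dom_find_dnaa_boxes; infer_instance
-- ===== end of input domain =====

-- ===== PORT A =====
-- B replaces the recursive neighbors helper (which re-scans a Hamming distance per
-- suffix neighbor at every level) by an iterative per-window pass whose dict tracks each
-- neighbor's distance incrementally; same exact result on every input A returns on.
-- Both ports keep the set elements as char lists internally and convert with String.ofList
-- at the boundary (Python strings are immutable char sequences; String.ofList is injective).

def pvNucs : List Char := ['A', 'C', 'G', 'T']

-- hamming_distance: returns none exactly where Python raises ValueError (unequal lengths)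
def hammingA (s t : List Char) : Option Int :=
  if PySem.List.len s ≠ PySem.List.len t then none
  else some ((PySem.List.pyRange 0 (PySem.List.len s) 1).foldl
    (fun h i => if PySem.List.pyGetD s i ' ' ≠ PySem.List.pyGetD t i ' ' then h + 1 else h + 0) 0)

-- the 'for text in suffix_neighbors' loop of neighbors (none = a ValueError propagating)
def extendA (c : Char) (cs : List Char) (d : Int) :
    List (List Char) → PySem.Set (List Char) → Option (PySem.Set (List Char))
  | [], acc => some acc
  | t :: ts, acc =>
    match hammingA cs t with
    | none => none
    | some h =>
      if h < d then extendA c cs d ts (pvNucs.foldl (fun a n => PySem.Set.add a (n :: t)) acc)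
      else extendA c cs d ts (PySem.Set.add acc (c :: t))

-- neighbors; on the empty pattern with d ≠ 0 Python recurses forever (RecursionError):
-- that case is unrepresentable and is marked none (excluded by Pre_)
def neighborsA : List Char → Int → Option (PySem.Set (List Char))
  | p, d =>
    if d = 0 then some (PySem.Set.ofList [p])
    else match p with
    | [] => none
    | [_] => some (PySem.Set.ofList (pvNucs.map (fun n => [n])))
    | c :: cs =>
      match neighborsA cs d with
      | none => none
      | some sn => extendA c cs d sn PySem.Set.empty

def findA (g : List Char) (k d : Int) : Option (PySem.Set (List Char)) :=
  (PySem.List.pyRange 0 (PySem.List.len g - k + 1) 1).foldl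
    (fun acc i =>
      match acc with
      | none => none
      | some boxes =>
        match neighborsA (PySem.List.slice g (some i) (some (i + k))) d with
        | none => none
        | some nbrs => some (nbrs.foldl PySem.Set.add boxes))
    (some PySem.Set.empty)

def find_dnaa_boxes (genome : String) (k : Int) (d : Int) : List String :=
  ((findA genome.toList k d).getD []).map String.ofList  -- getD [] only where Python raises (outside Pre_)

-- ===== PORT B =====

-- the 'for t in level' loop of Source B (one level of the right-to-left pass)
def altInner (c : Char) (d : Int) (D0 : PySem.Dict (List Char) Int)
    (L : List (List Char)) (acc : PySem.Set (List Char) × PySem.Dict (List Char) Int) :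
    PySem.Set (List Char) × PySem.Dict (List Char) Int :=
  L.foldl (fun acc t =>
    let e := PySem.Dict.getD D0 t 0  -- dist[t]; a KeyError is impossible: every level element has an entry
    if e < d then
      pvNucs.foldl (fun acc2 n =>
        (PySem.Set.add acc2.1 (n :: t),
         PySem.Dict.insert acc2.2 (n :: t) (e + (if n ≠ c then 1 else 0)))) acc
    else (PySem.Set.add acc.1 (c :: t), PySem.Dict.insert acc.2 (c :: t) e)) acc

-- the 'for c in reversed(pattern[:-1])' loop with its (level, dist) state
def altLevels (d : Int) (p : List Char) : PySem.Set (List Char) × PySem.Dict (List Char) Int :=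
  (PySem.List.slice p none (some (-1))).reverse.foldl
    (fun ld c => altInner c d ld.2 ld.1 (PySem.Set.empty, PySem.Dict.empty))
    (PySem.Set.ofList (pvNucs.map (fun n => [n])),
     pvNucs.foldl (fun dd n =>
       PySem.Dict.insert dd [n]
         (if n = PySem.List.pyGetD p (-1) ' ' then (0 : Int) else 1)) PySem.Dict.empty)

def find_dnaa_boxes_alt (genome : String) (k : Int) (d : Int) : List String :=
  ((PySem.List.pyRange 0 (PySem.List.len genome.toList - k + 1) 1).foldl
    (fun boxes i =>
      let pattern := PySem.List.slice genome.toList (some i) (some (i + k))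
      if d = 0 then PySem.Set.add boxes pattern
      else (altLevels d pattern).1.foldl PySem.Set.add boxes)
    PySem.Set.empty).map String.ofList

-- ===== PRECONDITION & SPEC =====
-- For d ≠ 0 and k ≤ 0 every window genome[i:i+k] is the empty string and Python's
-- neighbors recurses on it forever (RecursionError); A returns on all other inputs.
def Pre_find_dnaa_boxes (genome : String) (k : Int) (d : Int) : Prop := d = 0 ∨ 1 ≤ k
instance (genome : String) (k : Int) (d : Int) : Decidable (Pre_find_dnaa_boxes genome k d) := by
  unfold Pre_find_dnaa_boxes; infer_instance

def pvWitness_find_dnaa_boxes : String × Int × Int := ("ACGT", 2, 1)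

def Spec_find_dnaa_boxes (genome : String) (k : Int) (d : Int) (out : List String) : Prop := out = find_dnaa_boxes_alt genome k d
instance (genome : String) (k : Int) (d : Int) (out : List String) : Decidable (Spec_find_dnaa_boxes genome k d out) := by unfold Spec_find_dnaa_boxes; infer_instance

-- ===== CLAIM (what is proved, stated in full; the proofs are below) =====
def Claim_equal_find_dnaa_boxes : Prop := ∀ (genome : String) (k : Int) (d : Int), Dom_find_dnaa_boxes genome k d → Pre_find_dnaa_boxes genome k d → Spec_find_dnaa_boxes genome k d (find_dnaa_boxes genome k d)

-- ===== LEMMAS AND PROOFS =====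

def hamC : List Char → List Char → Int
  | a :: s, b :: t => (if a = b then 0 else 1) + hamC s t
  | _, _ => 0

def extList (c : Char) (cs : List Char) (d : Int) (S : List (List Char)) : List (List Char) :=
  S.flatMap (fun t => if hamC cs t < d then pvNucs.map (· :: t) else [c :: t])

theorem countAux : ∀ (s t : List Char), s.length = t.length → ∀ (a : Int),
    (List.range s.length).foldl (fun h i => if s.getD i ' ' ≠ t.getD i ' ' then h + 1 else h + 0) a
      = a + hamC s t := by
  intro s
  induction s with
  | nil => intro t h a; simp [hamC]
  | cons x s ih =>
    intro t h a
    cases t with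
    | nil => simp at h
    | cons y t =>
      simp only [List.length_cons, List.range_succ_eq_map, List.foldl_cons, List.foldl_map,
        List.getD_cons_succ, List.getD_cons_zero]
      have h' : s.length = t.length := by simpa using h
      rw [ih t h']
      show (if x ≠ y then a + 1 else a + 0) + hamC s t = a + hamC (x :: s) (y :: t)
      by_cases hxy : x = y <;> simp [hamC, hxy] <;> ring

theorem hammingA_eq (s t : List Char) (h : s.length = t.length) :
    hammingA s t = some (hamC s t) := by
  unfold hammingA
  rw [if_neg (by simp [PySem.List.len_eq, h])]
  congr 1
  simp only [PySem.List.len_eq, PySem.List.pyRange_zero_natCast, List.foldl_map,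
    PySem.List.pyGetD_natCast]
  simpa using countAux s t h 0

theorem foldl_add_nodup (l acc : List (List Char)) (h : (acc ++ l).Nodup) :
    l.foldl PySem.Set.add acc = acc ++ l := by
  induction l generalizing acc with
  | nil => simp
  | cons x l ih =>
    have hx : x ∉ acc := by
      intro hm
      exact (List.disjoint_of_nodup_append h) hm (by simp)
    have : PySem.Set.add acc x = acc ++ [x] := by
      simp [PySem.Set.add, PySem.Set.contains, hx]
    rw [List.foldl_cons, this, ih (acc ++ [x]) (by simpa using h)]
    simp

theorem mem_block_tail {c : Char} {cs : List Char} {d : Int} {t x : List Char}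
    (hx : x ∈ (if hamC cs t < d then pvNucs.map (· :: t) else [c :: t])) :
    x.tail = t := by
  split at hx
  · obtain ⟨n, _, rfl⟩ := List.mem_map.mp hx; rfl
  · simp at hx; subst hx; rfl

theorem mem_extList_tail {c : Char} {cs : List Char} {d : Int} {S : List (List Char)}
    {x : List Char} (hx : x ∈ extList c cs d S) : x.tail ∈ S := by
  obtain ⟨t, ht, hxt⟩ := List.mem_flatMap.mp hx
  rw [mem_block_tail hxt]; exact ht

theorem nodup_extList (c : Char) (cs : List Char) (d : Int) (S : List (List Char))
    (hS : S.Nodup) : (extList c cs d S).Nodup := by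
  induction S with
  | nil => simp [extList]
  | cons t S ih =>
    have hS' : S.Nodup := (List.nodup_cons.mp hS).2
    have htS : t ∉ S := (List.nodup_cons.mp hS).1
    simp only [extList, List.flatMap_cons] at *
    apply List.Nodup.append
    · split
      · exact List.Nodup.map (fun a b hab => by injection hab) (by decide)
      · simp
    · exact ih hS'
    · intro x hx1 hx2
      have h1 := mem_block_tail hx1
      have h2 : x.tail ∈ S := mem_extList_tail hx2
      rw [h1] at h2; exact htS h2

theorem len_extList (c : Char) (cs : List Char) (d : Int) (S : List (List Char)) (m : Nat)
    (hS : ∀ t ∈ S, t.length = m) : ∀ x ∈ extList c cs d S, x.length = m + 1 := by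
  intro x hx
  obtain ⟨t, ht, hxt⟩ := List.mem_flatMap.mp hx
  have := hS t ht
  split at hxt
  · obtain ⟨n, _, rfl⟩ := List.mem_map.mp hxt; simp [this]
  · simp at hxt; subst hxt; simp [this]

def nbrsList : List Char → Int → List (List Char)
  | p, d =>
    if d = 0 then [p]
    else match p with
    | [] => []
    | [_] => pvNucs.map (fun n => [n])
    | c :: cs => extList c cs d (nbrsList cs d)

theorem extendA_eq (c : Char) (cs : List Char) (d : Int) :
    ∀ (ts : List (List Char)) (acc : PySem.Set (List Char)),
    (∀ t ∈ ts, t.length = cs.length) → (acc ++ extList c cs d ts).Nodup →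
    extendA c cs d ts acc = some (acc ++ extList c cs d ts) := by
  intro ts
  induction ts with
  | nil => intro acc _ _; simp [extendA, extList]
  | cons t ts ih =>
    intro acc hlen hnd
    have hblk : extList c cs d (t :: ts)
        = (if hamC cs t < d then pvNucs.map (· :: t) else [c :: t]) ++ extList c cs d ts := by
      simp [extList]
    rw [hblk] at hnd
    have hham : hammingA cs t = some (hamC cs t) :=
      hammingA_eq cs t (hlen t (by simp)).symm
    rw [extendA, hham]
    split
    · next heq => exact absurd heq (by simp)
    · next h heq =>
      injection heq with heq'
      subst heq'
      by_cases hlt : hamC cs t < d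
      · rw [if_pos hlt] at hnd ⊢
        have hnd' : ((acc ++ pvNucs.map (· :: t)) ++ extList c cs d ts).Nodup := by
          simpa [List.append_assoc] using hnd
        have hfold : pvNucs.foldl (fun a n => PySem.Set.add a (n :: t)) acc
            = acc ++ pvNucs.map (· :: t) := by
          rw [← List.foldl_map]
          exact foldl_add_nodup _ _ hnd'.of_append_left
        rw [hfold, ih _ (fun u hu => hlen u (by simp [hu])) hnd', hblk, if_pos hlt,
          List.append_assoc]
      · rw [if_neg hlt] at hnd ⊢
        have hnd' : ((acc ++ [c :: t]) ++ extList c cs d ts).Nodup := by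
          simpa [List.append_assoc] using hnd
        have hadd : PySem.Set.add acc (c :: t) = acc ++ [c :: t] := by
          have h1 : PySem.Set.add acc (c :: t) = List.foldl PySem.Set.add acc [c :: t] := by
            simp [List.foldl_cons]
          rw [h1]; exact foldl_add_nodup [c :: t] acc hnd'.of_append_left
        rw [hadd, ih _ (fun u hu => hlen u (by simp [hu])) hnd', hblk, if_neg hlt,
          List.append_assoc]

theorem neighborsA_eq (d : Int) (hd : d ≠ 0) :
    ∀ (p : List Char), p ≠ [] →
    neighborsA p d = some (nbrsList p d) ∧ (nbrsList p d).Nodup ∧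
      ∀ t ∈ nbrsList p d, t.length = p.length := by
  intro p
  induction p with
  | nil => intro h; exact absurd rfl h
  | cons c cs ih =>
    intro _
    cases cs with
    | nil =>
      have hnb : nbrsList [c] d = pvNucs.map (fun n => [n]) := by
        rw [nbrsList, if_neg hd]
      have hna : neighborsA [c] d = some (PySem.Set.ofList (pvNucs.map (fun n => [n]))) := by
        rw [neighborsA, if_neg hd]
      refine ⟨?_, ?_, ?_⟩
      · rw [hna, hnb]; rfl
      · rw [hnb]; decide
      · rw [hnb]; intro t ht; simp at ht; obtain ⟨n, _, rfl⟩ := ht; rfl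
    | cons y cs' =>
      obtain ⟨h1, h2, h3⟩ := ih (by simp)
      have hext := extendA_eq c (y :: cs') d (nbrsList (y :: cs') d) PySem.Set.empty
        h3 (by simpa [PySem.Set.empty] using nodup_extList c (y :: cs') d _ h2)
      have hnb : nbrsList (c :: y :: cs') d = extList c (y :: cs') d (nbrsList (y :: cs') d) := by
        rw [nbrsList, if_neg hd] <;> simp
      have hna : neighborsA (c :: y :: cs') d
          = extendA c (y :: cs') d (nbrsList (y :: cs') d) PySem.Set.empty := by
        rw [neighborsA, if_neg hd, h1] <;> simp
      refine ⟨?_, ?_, ?_⟩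
      · rw [hna, hnb]; simpa [PySem.Set.empty] using hext
      · rw [hnb]; exact nodup_extList _ _ _ _ h2
      · rw [hnb]
        intro t ht
        simpa using len_extList c (y :: cs') d _ _ h3 t ht

theorem window_ne_nil (g : List Char) (k i : Int) (hk : 1 ≤ k) (hi : 0 ≤ i)
    (hik : i + k ≤ g.length) : PySem.List.slice g (some i) (some (i + k)) ≠ [] := by
  intro h
  rw [PySem.List.slice_toNat g (by omega) (by omega)] at h
  have := congrArg List.length h
  simp [List.length_take, List.length_drop] at this
  omega

theorem foldA (g : List Char) (k d : Int) :
    ∀ (is : List Int) (acc : PySem.Set (List Char)),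
    (∀ i ∈ is, neighborsA (PySem.List.slice g (some i) (some (i + k))) d
        = some (nbrsList (PySem.List.slice g (some i) (some (i + k))) d)) →
    is.foldl
      (fun acc i =>
        match acc with
        | none => none
        | some boxes =>
          match neighborsA (PySem.List.slice g (some i) (some (i + k))) d with
          | none => none
          | some nbrs => some (nbrs.foldl PySem.Set.add boxes))
      (some acc)
    = some (is.foldl
        (fun s i => (nbrsList (PySem.List.slice g (some i) (some (i + k))) d).foldl
          PySem.Set.add s) acc) := by
  intro is
  induction is with
  | nil => intro acc _; simp
  | cons i is ih =>
    intro acc h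
    rw [List.foldl_cons, List.foldl_cons, h i (by simp)]
    exact ih _ (fun j hj => h j (by simp [hj]))

theorem hamC_cons_ext (c n : Char) (cs t : List Char) :
    hamC cs t + (if n ≠ c then 1 else 0) = hamC (c :: cs) (n :: t) := by
  have : hamC (c :: cs) (n :: t) = (if c = n then 0 else 1) + hamC cs t := rfl
  rw [this]
  by_cases hcn : c = n
  · simp [hcn]
  · rw [if_neg hcn, if_pos (show n ≠ c from fun h => hcn h.symm), Int.add_comm]

theorem nucsFold (t : List Char) (v : Char → Int) :
    ∀ (ns : List Char) (S0 : PySem.Set (List Char)) (Dd : PySem.Dict (List Char) Int),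
    (S0 ++ ns.map (· :: t)).Nodup →
    (ns.foldl (fun a n =>
        (PySem.Set.add a.1 (n :: t), PySem.Dict.insert a.2 (n :: t) (v n))) (S0, Dd)).1
        = S0 ++ ns.map (· :: t)
    ∧ (∀ x : List Char, x ∉ ns.map (· :: t) →
        PySem.Dict.get? (ns.foldl (fun a n =>
          (PySem.Set.add a.1 (n :: t), PySem.Dict.insert a.2 (n :: t) (v n))) (S0, Dd)).2 x
          = PySem.Dict.get? Dd x)
    ∧ (ns.Nodup → ∀ n ∈ ns,
        PySem.Dict.get? (ns.foldl (fun a n =>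
          (PySem.Set.add a.1 (n :: t), PySem.Dict.insert a.2 (n :: t) (v n))) (S0, Dd)).2 (n :: t)
          = some (v n)) := by
  intro ns
  induction ns with
  | nil => intro S0 Dd _; refine ⟨by simp, fun x _ => rfl, fun _ n hn => absurd hn (by simp)⟩
  | cons n ns ih =>
    intro S0 Dd hnd
    have hnotin : (n :: t) ∉ S0 := fun hm =>
      (List.disjoint_of_nodup_append hnd) hm (by simp)
    have hadd : PySem.Set.add S0 (n :: t) = S0 ++ [n :: t] := by
      have h1 : PySem.Set.add S0 (n :: t) = List.foldl PySem.Set.add S0 [n :: t] := by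
        simp [List.foldl_cons]
      rw [h1]
      exact foldl_add_nodup [n :: t] S0 (by
        have : (S0 ++ [n :: t]).Sublist (S0 ++ (n :: t) :: ns.map (· :: t)) := by
          apply List.Sublist.append_left
          simp
        exact hnd.sublist this)
    have hnd' : ((S0 ++ [n :: t]) ++ ns.map (· :: t)).Nodup := by
      simpa [List.append_assoc] using hnd
    have step : (List.foldl (fun a n =>
        (PySem.Set.add a.1 (n :: t), PySem.Dict.insert a.2 (n :: t) (v n))) (S0, Dd) (n :: ns))
        = List.foldl (fun a n =>
        (PySem.Set.add a.1 (n :: t), PySem.Dict.insert a.2 (n :: t) (v n)))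
          (S0 ++ [n :: t], PySem.Dict.insert Dd (n :: t) (v n)) ns := by
      rw [List.foldl_cons, hadd]
    obtain ⟨ih1, ih2, ih3⟩ := ih (S0 ++ [n :: t]) (PySem.Dict.insert Dd (n :: t) (v n)) hnd'
    refine ⟨?_, ?_, ?_⟩
    · rw [step, ih1]; simp
    · intro x hx
      have hx1 : x ≠ n :: t := fun h => hx (by simp [h])
      have hx2 : x ∉ ns.map (· :: t) := fun h => hx (by simp [h])
      rw [step, ih2 x hx2, PySem.Dict.get?_insert_of_ne _ _ hx1]
    · intro hnodup m hm
      rcases List.mem_cons.mp hm with h | h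
      · subst h
        have hmt : (m :: t) ∉ ns.map (· :: t) := by
          intro hmem
          obtain ⟨n', hn', he⟩ := List.mem_map.mp hmem
          injection he with he1
          exact (List.nodup_cons.mp hnodup).1 (he1 ▸ hn')
        rw [step, ih2 _ hmt, PySem.Dict.get?_insert_self]
      · rw [step]; exact ih3 (List.nodup_cons.mp hnodup).2 m h

theorem levelStep (c : Char) (cs : List Char) (d : Int) (D0 : PySem.Dict (List Char) Int) :
    ∀ (L : List (List Char)) (accS : PySem.Set (List Char)) (accD : PySem.Dict (List Char) Int),
    (∀ t ∈ L, PySem.Dict.getD D0 t 0 = hamC cs t) →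
    (accS ++ extList c cs d L).Nodup →
    (∀ x ∈ accS, PySem.Dict.getD accD x 0 = hamC (c :: cs) x) →
    (altInner c d D0 L (accS, accD)).1 = accS ++ extList c cs d L
    ∧ ∀ x ∈ accS ++ extList c cs d L,
        PySem.Dict.getD (altInner c d D0 L (accS, accD)).2 x 0 = hamC (c :: cs) x := by
  intro L
  induction L with
  | nil =>
    intro accS accD _ _ hD
    refine ⟨by simp [altInner, extList], ?_⟩
    intro x hx
    simp only [extList, List.flatMap_nil, List.append_nil] at hx
    simpa [altInner, extList] using hD x hx
  | cons t L ih =>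
    intro accS accD hD0 hnd hacc
    have hblk : extList c cs d (t :: L)
        = (if hamC cs t < d then pvNucs.map (· :: t) else [c :: t]) ++ extList c cs d L := by
      simp [extList]
    rw [hblk] at hnd
    have he : PySem.Dict.getD D0 t 0 = hamC cs t := hD0 t (by simp)
    have hstep : altInner c d D0 (t :: L) (accS, accD)
        = altInner c d D0 L
            (if hamC cs t < d then
              pvNucs.foldl (fun a n =>
                (PySem.Set.add a.1 (n :: t),
                 PySem.Dict.insert a.2 (n :: t) (hamC cs t + (if n ≠ c then 1 else 0)))) (accS, accD)
             else (PySem.Set.add accS (c :: t), PySem.Dict.insert accD (c :: t) (hamC cs t))) := by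
      rw [altInner, List.foldl_cons]
      simp only [he]
      rw [altInner]
    by_cases hlt : hamC cs t < d
    · rw [if_pos hlt] at hnd hblk
      rw [hstep, if_pos hlt]
      have hnd1 : (accS ++ pvNucs.map (· :: t)).Nodup :=
        (by simpa [List.append_assoc] using hnd : ((accS ++ pvNucs.map (· :: t)) ++ extList c cs d L).Nodup).of_append_left
      obtain ⟨nf1, nf2, nf3⟩ := nucsFold t (fun n => hamC cs t + (if n ≠ c then 1 else 0))
        pvNucs accS accD hnd1
      have hD0' : ∀ u ∈ L, PySem.Dict.getD D0 u 0 = hamC cs u :=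
        fun u hu => hD0 u (by simp [hu])
      have hacc' : ∀ x ∈ accS ++ pvNucs.map (· :: t),
          PySem.Dict.getD (pvNucs.foldl (fun a n =>
            (PySem.Set.add a.1 (n :: t),
             PySem.Dict.insert a.2 (n :: t) (hamC cs t + (if n ≠ c then 1 else 0)))) (accS, accD)).2 x 0
            = hamC (c :: cs) x := by
        intro x hx
        rcases List.mem_append.mp hx with hx | hx
        · have hxn : x ∉ pvNucs.map (· :: t) := fun hm =>
            (List.disjoint_of_nodup_append hnd1) hx hm
          rw [PySem.Dict.getD, nf2 x hxn]
          exact hacc x hx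
        · obtain ⟨n, hn, rfl⟩ := List.mem_map.mp hx
          rw [PySem.Dict.getD, nf3 (by decide) n hn]
          simpa using hamC_cons_ext c n cs t
      obtain ⟨c1, c2⟩ := ih
        (pvNucs.foldl (fun a n =>
          (PySem.Set.add a.1 (n :: t),
           PySem.Dict.insert a.2 (n :: t) (hamC cs t + (if n ≠ c then 1 else 0)))) (accS, accD)).1
        (pvNucs.foldl (fun a n =>
          (PySem.Set.add a.1 (n :: t),
           PySem.Dict.insert a.2 (n :: t) (hamC cs t + (if n ≠ c then 1 else 0)))) (accS, accD)).2
        hD0' (by rw [nf1]; simpa [List.append_assoc] using hnd) (by rw [nf1]; exact hacc')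
      rw [Prod.mk.eta] at c1 c2
      constructor
      · rw [c1, nf1, hblk, List.append_assoc]
      · intro x hx
        apply c2
        rw [nf1, hblk] at *
        simpa [List.append_assoc] using hx
    · rw [if_neg hlt] at hnd hblk
      rw [hstep, if_neg hlt]
      have hnd1 : (accS ++ [c :: t]).Nodup :=
        (by simpa [List.append_assoc] using hnd : ((accS ++ [c :: t]) ++ extList c cs d L).Nodup).of_append_left
      obtain ⟨nf1, nf2, nf3⟩ := nucsFold t (fun _ => hamC cs t) [c] accS accD (by simpa using hnd1)
      have hfix : ([c].foldl (fun a n =>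
          (PySem.Set.add a.1 (n :: t), PySem.Dict.insert a.2 (n :: t) ((fun _ : Char => hamC cs t) n))) (accS, accD))
          = (PySem.Set.add accS (c :: t), PySem.Dict.insert accD (c :: t) (hamC cs t)) := rfl
      rw [hfix] at nf1 nf2 nf3
      simp only [] at nf1
      have hadd : PySem.Set.add accS (c :: t) = accS ++ [c :: t] := by simpa using nf1
      have hacc' : ∀ x ∈ accS ++ [c :: t],
          PySem.Dict.getD (PySem.Dict.insert accD (c :: t) (hamC cs t)) x 0 = hamC (c :: cs) x := by
        intro x hx
        rcases List.mem_append.mp hx with hx | hx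
        · have hxn : x ∉ [c].map (· :: t) := fun hm =>
            (List.disjoint_of_nodup_append (by simpa using hnd1)) hx hm
          rw [PySem.Dict.getD, nf2 x hxn]
          exact hacc x hx
        · simp at hx
          subst hx
          rw [PySem.Dict.getD, nf3 (by simp) c (by simp)]
          have h0 := hamC_cons_ext c c cs t
          simp at h0
          simpa using h0
      have hD0' : ∀ u ∈ L, PySem.Dict.getD D0 u 0 = hamC cs u :=
        fun u hu => hD0 u (by simp [hu])
      obtain ⟨c1, c2⟩ := ih (accS ++ [c :: t]) (PySem.Dict.insert accD (c :: t) (hamC cs t))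
        hD0' (by simpa [List.append_assoc] using hnd) hacc'
      rw [hadd]
      constructor
      · rw [c1, hblk, List.append_assoc]
      · intro x hx
        apply c2
        rw [hblk] at hx
        simpa [List.append_assoc] using hx

theorem startDict (p : List Char) (n : Char) (hn : n ∈ pvNucs) :
    PySem.Dict.getD (pvNucs.foldl (fun dd m =>
      PySem.Dict.insert dd [m]
        (if m = PySem.List.pyGetD p (-1) ' ' then (0 : Int) else 1)) PySem.Dict.empty) [n] 0
      = (if n = PySem.List.pyGetD p (-1) ' ' then (0 : Int) else 1) := by
  fin_cases hn <;>
    simp [pvNucs, PySem.Dict.getD, PySem.Dict.get?, PySem.Dict.insert, PySem.Dict.contains,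
      PySem.Dict.empty, List.foldl_cons]

theorem altLevels_eq (d : Int) (hd : d ≠ 0) :
    ∀ (p : List Char), p ≠ [] →
    (altLevels d p).1 = nbrsList p d ∧
      ∀ t ∈ nbrsList p d, PySem.Dict.getD (altLevels d p).2 t 0 = hamC p t := by
  intro p
  induction p with
  | nil => intro h; exact absurd rfl h
  | cons c cs ih =>
    intro _
    cases cs with
    | nil =>
      have hs : altLevels d [c] = (PySem.Set.ofList (pvNucs.map (fun n => [n])),
          pvNucs.foldl (fun dd n =>
            PySem.Dict.insert dd [n]
              (if n = PySem.List.pyGetD [c] (-1) ' ' then (0 : Int) else 1)) PySem.Dict.empty) := by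
        rw [altLevels, PySem.List.slice_to_neg_one]
        rfl
      have hnb : nbrsList [c] d = pvNucs.map (fun n => [n]) := by
        rw [nbrsList, if_neg hd]
      constructor
      · rw [hs, hnb]; rfl
      · rw [hs, hnb]
        intro t ht
        obtain ⟨n, hn, rfl⟩ := List.mem_map.mp ht
        rw [startDict [c] n hn]
        rw [PySem.List.pyGetD_neg_one _ ' ' (by simp), List.getLast_singleton]
        have : hamC [c] [n] = (if c = n then 0 else 1) + 0 := rfl
        rw [this]
        by_cases hcn : c = n
        · simp [hcn]
        · rw [if_neg hcn, if_neg (show ¬ n = c from fun h => hcn h.symm)]; norm_num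
    | cons y cs' =>
      obtain ⟨ih1, ih2⟩ := ih (by simp)
      have hanb := neighborsA_eq d hd (y :: cs') (by simp)
      have hlast : PySem.List.pyGetD (c :: y :: cs') (-1) ' '
          = PySem.List.pyGetD (y :: cs') (-1) ' ' := by
        rw [PySem.List.pyGetD_neg_one _ ' ' (by simp), PySem.List.pyGetD_neg_one _ ' ' (by simp),
          List.getLast_cons (by simp)]
      have hdrop : (c :: y :: cs').dropLast = c :: (y :: cs').dropLast := by
        simp [List.dropLast_cons₂]
      have hsplit : altLevels d (c :: y :: cs')
          = altInner c d (altLevels d (y :: cs')).2 (altLevels d (y :: cs')).1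
              (PySem.Set.empty, PySem.Dict.empty) := by
        rw [altLevels, altLevels, PySem.List.slice_to_neg_one, PySem.List.slice_to_neg_one,
          hdrop, List.reverse_cons, List.foldl_append, hlast, List.foldl_cons, List.foldl_nil]
      have hstep := levelStep c (y :: cs') d (altLevels d (y :: cs')).2
        (nbrsList (y :: cs') d) PySem.Set.empty PySem.Dict.empty
        ih2
        (by simpa [PySem.Set.empty] using nodup_extList c (y :: cs') d _ hanb.2.1)
        (by intro x hx; simp [PySem.Set.empty] at hx)
      rw [ih1] at hsplit
      have hnb : nbrsList (c :: y :: cs') d = extList c (y :: cs') d (nbrsList (y :: cs') d) := by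
        rw [nbrsList, if_neg hd] <;> simp
      constructor
      · rw [hsplit, hstep.1, hnb]; rfl
      · intro t ht
        rw [hsplit]
        apply hstep.2
        rw [hnb] at ht
        simpa [PySem.Set.empty] using ht

theorem main_eq (genome : String) (k d : Int) (hpre : d = 0 ∨ 1 ≤ k) :
    find_dnaa_boxes genome k d = find_dnaa_boxes_alt genome k d := by
  have hrange : ∀ i ∈ PySem.List.pyRange 0 (PySem.List.len genome.toList - k + 1) 1,
      0 ≤ i ∧ i + k ≤ (genome.toList.length : Int) := by
    intro i hi
    have := PySem.List.mem_pyRange_one.mp hi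
    rw [PySem.List.len_eq] at this
    omega
  have hne : d ≠ 0 → ∀ i ∈ PySem.List.pyRange 0 (PySem.List.len genome.toList - k + 1) 1,
      PySem.List.slice genome.toList (some i) (some (i + k)) ≠ [] := by
    intro hd i hi
    have hk : 1 ≤ k := hpre.resolve_left hd
    exact window_ne_nil _ _ _ hk (hrange i hi).1 (hrange i hi).2
  have hwin : ∀ i ∈ PySem.List.pyRange 0 (PySem.List.len genome.toList - k + 1) 1,
      neighborsA (PySem.List.slice genome.toList (some i) (some (i + k))) d
        = some (nbrsList (PySem.List.slice genome.toList (some i) (some (i + k))) d) := by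
    intro i hi
    by_cases hd : d = 0
    · subst hd
      rw [neighborsA.eq_def, nbrsList.eq_def]
      norm_num
      rfl
    · exact (neighborsA_eq d hd _ (hne hd i hi)).1
  have hA : find_dnaa_boxes genome k d
      = ((PySem.List.pyRange 0 (PySem.List.len genome.toList - k + 1) 1).foldl
          (fun s i => (nbrsList (PySem.List.slice genome.toList (some i) (some (i + k))) d).foldl
            PySem.Set.add s) PySem.Set.empty).map String.ofList := by
    unfold find_dnaa_boxes findA
    rw [foldA genome.toList k d _ PySem.Set.empty hwin, Option.getD_some]
  have hB : find_dnaa_boxes_alt genome k d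
      = ((PySem.List.pyRange 0 (PySem.List.len genome.toList - k + 1) 1).foldl
          (fun s i => (nbrsList (PySem.List.slice genome.toList (some i) (some (i + k))) d).foldl
            PySem.Set.add s) PySem.Set.empty).map String.ofList := by
    unfold find_dnaa_boxes_alt
    congr 1
    apply PySem.List.foldl_congr_mem
    intro boxes i hi
    by_cases hd : d = 0
    · simp only [if_pos hd]
      have : nbrsList (PySem.List.slice genome.toList (some i) (some (i + k))) d
          = [PySem.List.slice genome.toList (some i) (some (i + k))] := by
        rw [hd, nbrsList.eq_def]
        simp
      rw [this]
      rfl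
    · simp only [if_neg hd]
      rw [(altLevels_eq d hd _ (hne hd i hi)).1]
  rw [hA, hB]

-- ===== VERDICT (by name: the statement is the Claim_ definition above) =====
theorem find_dnaa_boxes_spec : Claim_equal_find_dnaa_boxes := by
  intro genome k d _ hpre
  exact main_eq genome k d hpre
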